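-- pv_equiv track=rewrite | github.com/ImZackAdams/nyx-agents | lilbot/cli/_agent_policy.py | _collapse_duplicate_items
-- ===== SOURCE A (Python) =====
-- from collections.abc import Mapping, Sequence
--
-- def _collapse_duplicate_items(items: Sequence[str]) -> list[tuple[str, int]]:
--     counts: dict[str, int] = {}
--     order: list[str] = []
--     for item in items:
--         if item not in counts:
--             order.append(item)
--             counts[item] = 0
--         counts[item] += 1
--     return [(item, counts[item]) for item in order]
-- ===== SOURCE B (Python) =====
-- def _collapse_duplicate_items(items):
--     # Pass 1: full frequency table.
--     counts = {}
--     for item in items: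
--         counts[item] = counts.get(item, 0) + 1
--     # Pass 2: emit each distinct item once, in first-seen order, with its total count.
--     seen = set()
--     result = []
--     for item in items:
--         if item not in seen:
--             seen.add(item)
--             result.append((item, counts[item]))
--     return result
-- ===== Notes on version B (the rewrite author's own statement) =====
-- stated objective: alternative
-- what changed: Separates counting from emission: B builds the complete frequency table in a first pass, then a second set-guarded pass over the input emits (item, total) at each first occurrence, instead of A's single interleaved loop that maintains a dict and an order list and finishes with a comprehension over the order list.
import Mathlib
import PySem

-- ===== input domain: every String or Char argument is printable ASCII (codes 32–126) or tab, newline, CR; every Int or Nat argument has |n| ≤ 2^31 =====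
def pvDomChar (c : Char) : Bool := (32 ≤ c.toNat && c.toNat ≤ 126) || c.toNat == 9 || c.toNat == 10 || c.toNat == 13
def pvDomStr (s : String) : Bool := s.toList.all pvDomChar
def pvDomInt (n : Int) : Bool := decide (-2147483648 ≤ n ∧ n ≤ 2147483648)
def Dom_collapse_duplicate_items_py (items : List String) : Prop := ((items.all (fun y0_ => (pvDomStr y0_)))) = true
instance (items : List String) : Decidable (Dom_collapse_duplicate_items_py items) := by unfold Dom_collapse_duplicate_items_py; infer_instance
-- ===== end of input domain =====

-- B separates counting from emission (frequency table first, then a set-guarded ordered pass); same O(n) cost, different decomposition.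


-- ===== PORT A =====
-- one loop maintaining (counts, order); then a comprehension over order.
-- counts[item] after the conditional is always present, so `counts[item] += 1` is getD-based (no KeyError possible).
def collapse_duplicate_items_py (items : List String) : List (String × Int) :=
  let st := items.foldl
    (fun (st : PySem.Dict String Int × List String) item =>
      let st' := if st.1.contains item then st else (st.1.insert item 0, st.2 ++ [item])
      (st'.1.insert item (st'.1.getD item 0 + 1), st'.2))
    (PySem.Dict.empty, [])
  st.2.map (fun item => (item, st.1.getD item 0))

-- ===== PORT B =====
-- pass 1: full frequency table; pass 2: set-guarded emission in first-seen order.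
-- counts[item] in pass 2 is always present, so the lookup is getD-based (no KeyError possible).
def collapse_duplicate_items_py_alt (items : List String) : List (String × Int) :=
  let counts := items.foldl
    (fun (d : PySem.Dict String Int) item => d.insert item (d.getD item 0 + 1)) PySem.Dict.empty
  (items.foldl
    (fun (st : PySem.Set String × List (String × Int)) item =>
      if PySem.Set.contains st.1 item then st
      else (PySem.Set.add st.1 item, st.2 ++ [(item, counts.getD item 0)]))
    (PySem.Set.empty, [])).2

-- ===== PRECONDITION & SPEC =====
def Spec_collapse_duplicate_items_py (items : List String) (out : List (String × Int)) : Prop := out = collapse_duplicate_items_py_alt items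
instance (items : List String) (out : List (String × Int)) : Decidable (Spec_collapse_duplicate_items_py items out) := by unfold Spec_collapse_duplicate_items_py; infer_instance

-- ===== CLAIM (what is proved, stated in full; the proofs are below) =====
def Claim_equal_collapse_duplicate_items_py : Prop := ∀ (items : List String), Dom_collapse_duplicate_items_py items → Spec_collapse_duplicate_items_py items (collapse_duplicate_items_py items)

-- ===== LEMMAS AND PROOFS =====

-- Set.update keeps its first argument as a prefix.
theorem pv_update_prefix (l s : List String) :
    ∃ t, PySem.Set.update s l = s ++ t := by
  induction l generalizing s with
  | nil => exact ⟨[], by simp [PySem.Set.update]⟩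
  | cons x l ih =>
    rw [show PySem.Set.update s (x :: l) = PySem.Set.update (PySem.Set.add s x) l from rfl]
    by_cases hx : PySem.Set.contains s x
    · have hm : x ∈ s := by simpa [PySem.Set.contains] using hx
      have : PySem.Set.add s x = s := by simp [PySem.Set.add, PySem.Set.contains, hm]
      rw [this]; exact ih s
    · have hm : x ∉ s := by simpa [PySem.Set.contains] using hx
      have : PySem.Set.add s x = s ++ [x] := by simp [PySem.Set.add, PySem.Set.contains, hm]
      rw [this]
      obtain ⟨t, ht⟩ := ih (s ++ [x])
      exact ⟨x :: t, by rw [ht]; simp⟩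

-- A's loop: order accumulates as Set.update, counts accumulate total counts,
-- and the dict's key set tracks the order list.
theorem pv_A_fold (l : List String) (d : PySem.Dict String Int) (o : List String)
    (h : ∀ x, d.contains x = decide (x ∈ o)) :
    (l.foldl
      (fun (st : PySem.Dict String Int × List String) item =>
        let st' := if st.1.contains item then st else (st.1.insert item 0, st.2 ++ [item])
        (st'.1.insert item (st'.1.getD item 0 + 1), st'.2)) (d, o)).2
      = PySem.Set.update o l ∧
    (∀ x, (l.foldl
      (fun (st : PySem.Dict String Int × List String) item =>
        let st' := if st.1.contains item then st else (st.1.insert item 0, st.2 ++ [item])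
        (st'.1.insert item (st'.1.getD item 0 + 1), st'.2)) (d, o)).1.getD x 0
      = d.getD x 0 + l.count x) := by
  induction l generalizing d o with
  | nil => simp [PySem.Set.update, h]
  | cons a l ih =>
    simp only [List.foldl_cons]
    by_cases hc : d.contains a = true
    · have ha : a ∈ o := by have := h a; rw [hc] at this; exact of_decide_eq_true this.symm
      have hstep : ((if d.contains a then (d, o) else (d.insert a 0, o ++ [a])).1.insert a
            ((if d.contains a then (d, o) else (d.insert a 0, o ++ [a])).1.getD a 0 + 1),
          (if d.contains a then (d, o) else (d.insert a 0, o ++ [a])).2)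
          = (d.insert a (d.getD a 0 + 1), o) := by simp [hc]
      have h' : ∀ x, (d.insert a (d.getD a 0 + 1)).contains x = decide (x ∈ o) := by
        intro x
        rw [PySem.Dict.contains_insert]
        by_cases hx : x = a
        · subst hx; simp [ha]
        · simp [hx, h x]
      obtain ⟨h1, h2⟩ := ih (d.insert a (d.getD a 0 + 1)) o h'
      refine ⟨?_, ?_⟩
      · rw [show PySem.Set.update o (a :: l) = PySem.Set.update (PySem.Set.add o a) l from rfl]
        have : PySem.Set.add o a = o := by simp [PySem.Set.add, PySem.Set.contains, ha]
        rw [this]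
        simpa [hstep] using h1
      · intro x
        have := h2 x
        rw [hstep] at *
        rw [this, PySem.Dict.getD_insert]
        by_cases hx : x = a
        · subst hx; simp [List.count_cons]; ring
        · simp [hx, Ne.symm hx]
    · have hcf : d.contains a = false := by simpa using hc
      have ha : a ∉ o := by
        have := h a; rw [hcf] at this
        exact of_decide_eq_false this.symm
      have hstep : ((if d.contains a then (d, o) else (d.insert a 0, o ++ [a])).1.insert a
            ((if d.contains a then (d, o) else (d.insert a 0, o ++ [a])).1.getD a 0 + 1),
          (if d.contains a then (d, o) else (d.insert a 0, o ++ [a])).2)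
          = (d.insert a 1, o ++ [a]) := by
        simp [hcf, PySem.Dict.getD_insert_self, PySem.Dict.insert_insert_self]
      have h' : ∀ x, (d.insert a 1).contains x = decide (x ∈ o ++ [a]) := by
        intro x
        rw [PySem.Dict.contains_insert]
        by_cases hx : x = a
        · subst hx; simp
        · simp [hx, h x]
      obtain ⟨h1, h2⟩ := ih (d.insert a 1) (o ++ [a]) h'
      refine ⟨?_, ?_⟩
      · rw [show PySem.Set.update o (a :: l) = PySem.Set.update (PySem.Set.add o a) l from rfl]
        have : PySem.Set.add o a = o ++ [a] := by
          simp [PySem.Set.add, PySem.Set.contains, ha]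
        rw [this]
        simpa [hstep] using h1
      · intro x
        have := h2 x
        rw [hstep] at *
        rw [this, PySem.Dict.getD_insert]
        by_cases hx : x = a
        · subst hx
          rw [PySem.Dict.getD_of_not_contains d 0 hcf]
          simp
          ring
        · simp [hx, Ne.symm hx]

-- B's emission loop: the seen set accumulates as Set.update and the output appends
-- exactly the freshly seen items, with their table value.
theorem pv_B_fold (c : PySem.Dict String Int) (l : List String) (s : List String)
    (out : List (String × Int)) :
    (l.foldl
      (fun (st : PySem.Set String × List (String × Int)) item =>
        if PySem.Set.contains st.1 item then st
        else (PySem.Set.add st.1 item, st.2 ++ [(item, c.getD item 0)])) (s, out)).2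
    = out ++ ((PySem.Set.update s l).drop s.length).map (fun x => (x, c.getD x 0)) := by
  induction l generalizing s out with
  | nil => simp [PySem.Set.update]
  | cons a l ih =>
    simp only [List.foldl_cons]
    by_cases hc : PySem.Set.contains s a
    · have hm : a ∈ s := by simpa [PySem.Set.contains] using hc
      have hadd : PySem.Set.add s a = s := by simp [PySem.Set.add, PySem.Set.contains, hm]
      rw [if_pos hc, ih s out,
        show PySem.Set.update s (a :: l) = PySem.Set.update (PySem.Set.add s a) l from rfl, hadd]
    · have hm : a ∉ s := by simpa [PySem.Set.contains] using hc
      have hadd : PySem.Set.add s a = s ++ [a] := by simp [PySem.Set.add, PySem.Set.contains, hm]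
      rw [if_neg hc, ih (PySem.Set.add s a) (out ++ [(a, c.getD a 0)]),
        show PySem.Set.update s (a :: l) = PySem.Set.update (PySem.Set.add s a) l from rfl]
      obtain ⟨t, ht⟩ := pv_update_prefix l (PySem.Set.add s a)
      rw [ht, hadd]
      have h1 : ((s ++ [a]) ++ t).drop s.length = a :: t := by
        rw [List.append_assoc]
        simpa using List.drop_left (l₁ := s) (l₂ := a :: t)
      have h2 : ((s ++ [a]) ++ t).drop (s ++ [a]).length = t := List.drop_left
      rw [h1, h2]
      simp

-- ===== VERDICT (by name: the statement is the Claim_ definition above) =====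
theorem collapse_duplicate_items_py_spec : Claim_equal_collapse_duplicate_items_py := by
  intro items _
  unfold Spec_collapse_duplicate_items_py collapse_duplicate_items_py collapse_duplicate_items_py_alt
  obtain ⟨hA1, hA2⟩ := pv_A_fold items PySem.Dict.empty [] (by simp)
  rw [pv_B_fold]
  simp only [hA1, List.nil_append]
  have : ∀ x, (items.foldl
      (fun (st : PySem.Dict String Int × List String) item =>
        let st' := if st.1.contains item then st else (st.1.insert item 0, st.2 ++ [item])
        (st'.1.insert item (st'.1.getD item 0 + 1), st'.2))
      (PySem.Dict.empty, [])).1.getD x 0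
      = (items.foldl
        (fun (d : PySem.Dict String Int) item => d.insert item (d.getD item 0 + 1))
        PySem.Dict.empty).getD x 0 := by
    intro x
    rw [hA2 x, PySem.Dict.getD_foldl_insert_add_one]
  exact List.map_congr_left (fun x _ => by rw [this x])
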